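-- pv_equiv track=rewrite | github.com/pkleiz/sudoku-python-IA | main.py | contaRepetidos
-- ===== SOURCE A (Python) =====
-- def contaRepetidos(matrizContar):
--   somaTotal = 0
--
--   #separa linha a linha e conta o numero de repetidos
--   for i in range(len(matrizContar[0])):
--     #defino um dicionario vazio onde vou adicionando os valores dos indices
--     contaRepetidosLinha = {}
--
--     #Adiciona ao dicionario criado
--     for item in matrizContar[i]:
--       contaRepetidosLinha[item] = matrizContar[i].count(item)
--
--     #cria o interador para ser varrido no tamanho da linha da matriz e converte para lista
--     tamanhoRepetidos = len(contaRepetidosLinha)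
--     listaDosValores = list(contaRepetidosLinha.values())
--
--     #verifico quantas vezes ele esta se repetindo para criar o valor final da funcao
--     for valor in range(tamanhoRepetidos):
--       if (listaDosValores[valor] > 1):
--         somaTotal = somaTotal + listaDosValores[valor] - 1
--     return somaTotal
-- ===== SOURCE B (Python) =====
-- def contaRepetidos(matrizContar):
--   # Closed form: A tallies counts of the first row into a dict and sums (count-1)
--   # over values > 1; that total is exactly len(row) - number of distinct values.
--   row = matrizContar[0]
--   return len(row) - len(set(row))
-- ===== Notes on version B (the rewrite author's own statement) =====
-- stated objective: simpler
-- what changed: Replaces the dict-tally plus two scan loops with the closed form len(row) - len(set(row)), since the sum of (count-1) over distinct values of the first row is exactly the number of elements minus the number of distinct values.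
-- outside the precondition, e.g. on contaRepetidos([[]]): A returns None, B returns 0
import Mathlib
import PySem

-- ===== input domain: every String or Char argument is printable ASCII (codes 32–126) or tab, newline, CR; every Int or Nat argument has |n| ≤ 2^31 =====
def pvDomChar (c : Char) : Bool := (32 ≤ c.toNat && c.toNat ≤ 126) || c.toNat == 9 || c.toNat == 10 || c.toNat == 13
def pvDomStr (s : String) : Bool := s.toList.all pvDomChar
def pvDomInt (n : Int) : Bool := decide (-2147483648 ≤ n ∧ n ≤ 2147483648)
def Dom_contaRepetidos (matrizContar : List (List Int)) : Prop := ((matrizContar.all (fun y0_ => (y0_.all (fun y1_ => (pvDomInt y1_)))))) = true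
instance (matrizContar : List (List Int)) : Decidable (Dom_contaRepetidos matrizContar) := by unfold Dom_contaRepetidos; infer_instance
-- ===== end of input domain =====

-- B replaces A's dict tally and two scan loops over the first row by the closed
-- form len(row) - len(set(row)); objective: simpler.


-- ===== PORT A =====
-- The 'for i in range(...)' loop: it returns inside its first iteration, so it is
-- ported as a recursion that yields 'some' on the first element and 'none' if the
-- loop body never runs (Python falls off and returns None — excluded by Pre_).
def contaRepetidosLoop (matrizContar : List (List Int)) (idxs : List Int) (somaTotal : Int) : Option Int :=
  match idxs with
  | [] => none
  | i :: _ =>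
    -- matrizContar[i]; the [] default is unreachable under Pre_ (i = 0, matrix nonempty)
    let row := PySem.List.pyGetD matrizContar i []
    -- contaRepetidosLinha[item] = matrizContar[i].count(item)
    let contaRepetidosLinha := row.foldl
      (fun d item => d.insert item ((PySem.List.count row item : Nat) : Int)) PySem.Dict.empty
    let listaDosValores := PySem.Dict.values contaRepetidosLinha
    -- for valor in range(tamanhoRepetidos): if listaDosValores[valor] > 1: ...
    let soma := (PySem.List.pyRange 0 (PySem.List.len listaDosValores)).foldl
      (fun acc valor =>
        if PySem.List.pyGetD listaDosValores valor 0 > 1 then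
          acc + PySem.List.pyGetD listaDosValores valor 0 - 1
        else acc) somaTotal
    some soma

def contaRepetidos (matrizContar : List (List Int)) : Int :=
  -- len(matrizContar[0]): raises on an empty matrix (excluded by Pre_), default unreachable there
  ((contaRepetidosLoop matrizContar
      (PySem.List.pyRange 0 (PySem.List.len (PySem.List.pyGetD matrizContar 0 []))) 0).getD 0)

-- ===== PORT B =====
def contaRepetidos_alt (matrizContar : List (List Int)) : Int :=
  match matrizContar with
  | [] => 0  -- Python B raises IndexError here; outside Pre_
  | row :: _ => PySem.List.len row - PySem.List.len (PySem.Set.ofList row)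

-- ===== PRECONDITION & SPEC =====
-- Pre_ excludes the empty matrix (A raises IndexError) and an empty first row, on
-- which A falls off its loop and returns None, not an int.
def Pre_contaRepetidos (matrizContar : List (List Int)) : Prop :=
  matrizContar ≠ [] ∧ matrizContar.headI ≠ []
instance (matrizContar : List (List Int)) : Decidable (Pre_contaRepetidos matrizContar) := by
  unfold Pre_contaRepetidos; infer_instance
def pvWitness_contaRepetidos : List (List Int) := [[1, 2, 1, 3, 2]]

def Spec_contaRepetidos (matrizContar : List (List Int)) (out : Int) : Prop := out = contaRepetidos_alt matrizContar
instance (matrizContar : List (List Int)) (out : Int) : Decidable (Spec_contaRepetidos matrizContar out) := by unfold Spec_contaRepetidos; infer_instance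

-- ===== CLAIM (what is proved, stated in full; the proofs are below) =====
def Claim_equal_contaRepetidos : Prop := ∀ (matrizContar : List (List Int)), Dom_contaRepetidos matrizContar → Pre_contaRepetidos matrizContar → Spec_contaRepetidos matrizContar (contaRepetidos matrizContar)

-- ===== LEMMAS AND PROOFS =====

-- the dict built by 'contaRepetidosLinha[item] = row.count(item)' looks up to row.count
lemma getD_foldl_insert_count (row : List Int) (l : List Int) (d : PySem.Dict Int Int) (v : Int) :
    (l.foldl (fun d x => d.insert x ((PySem.List.count row x : Nat) : Int)) d).getD v 0
      = if v ∈ l then ((PySem.List.count row v : Nat) : Int) else d.getD v 0 := by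
  induction l generalizing d with
  | nil => simp
  | cons x t ih =>
    simp only [List.foldl_cons, ih, PySem.Dict.getD_insert, List.mem_cons]
    by_cases hvt : v ∈ t <;> by_cases hvx : v = x <;> simp [hvt, hvx]

lemma sum_map_sub_one (l : List Int) : (l.map (fun v => v - 1)).sum = l.sum - l.length := by
  induction l with
  | nil => simp
  | cons x t ih => simp [ih]; omega

lemma values_tally (row : List Int) :
    (row.foldl (fun d x => d.insert x ((PySem.List.count row x : Nat) : Int))
        PySem.Dict.empty).values
      = (PySem.Set.ofList row).map (fun k => ((PySem.List.count row k : Nat) : Int)) := by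
  have hkeys : (row.foldl (fun d x => d.insert x ((PySem.List.count row x : Nat) : Int))
      PySem.Dict.empty).keys = PySem.Set.ofList row := by
    rw [PySem.Dict.keys_foldl_insert]; rfl
  have hnd : (row.foldl (fun d x => d.insert x ((PySem.List.count row x : Nat) : Int))
      PySem.Dict.empty).keys.Nodup :=
    PySem.Dict.nodup_keys_foldl_insert _ _ _ PySem.Dict.nodup_keys_empty
  rw [PySem.Dict.values_eq_map_keys _ hnd 0, hkeys]
  apply List.map_congr_left
  intro k hk
  rw [getD_foldl_insert_count]
  simp [(PySem.Set.mem_ofList row k).mp hk]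

-- ===== VERDICT (by name: the statement is the Claim_ definition above) =====
theorem contaRepetidos_spec : Claim_equal_contaRepetidos := by
  intro m _ hpre
  obtain ⟨hne, hrow⟩ := hpre
  obtain ⟨row, rest, rfl⟩ : ∃ r t, m = r :: t := by
    cases m with
    | nil => exact absurd rfl hne
    | cons a b => exact ⟨a, b, rfl⟩
  simp only [List.headI] at hrow
  unfold Spec_contaRepetidos contaRepetidos contaRepetidos_alt
  have hlen : (0 : Int) < PySem.List.len row := by
    simp [PySem.List.len_eq]
    exact List.length_pos_iff.mpr hrow
  rw [PySem.List.pyGetD_zero_cons, PySem.List.pyRange_one_cons hlen]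
  unfold contaRepetidosLoop
  simp only [PySem.List.pyGetD_zero_cons, Option.getD_some]
  rw [values_tally]
  set vals := (PySem.Set.ofList row).map (fun k => ((PySem.List.count row k : Nat) : Int)) with hv
  rw [PySem.List.foldl_pyRange_zero_pyGetD vals 0 (fun acc v => if v > 1 then acc + v - 1 else acc) 0]
  have hone : ∀ v ∈ vals, (1 : Int) ≤ v := by
    intro v hvm
    rw [hv] at hvm
    obtain ⟨k, hk, rfl⟩ := List.mem_map.mp hvm
    have : k ∈ row := (PySem.Set.mem_ofList row k).mp hk
    have : 1 ≤ PySem.List.count row k := by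
      simpa [PySem.List.count] using List.count_pos_iff.mpr this
    exact_mod_cast this
  rw [PySem.List.foldl_congr_mem vals (fun acc v => if v > 1 then acc + v - 1 else acc)
    (fun acc v => acc + (v - 1)) 0
    (by intro acc x hx
        have := hone x hx
        by_cases h1 : x > 1 <;> simp [h1] <;> omega)]
  rw [PySem.List.foldl_add vals (fun v => v - 1) 0]
  rw [sum_map_sub_one]
  have hsum : vals.sum = (row.length : Int) := by
    rw [hv]
    have hperm : (PySem.Set.ofList row).Perm row.dedup := by
      rw [List.perm_ext_iff_of_nodup (PySem.Set.nodup_ofList row) row.nodup_dedup]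
      intro a
      rw [PySem.Set.mem_ofList, List.mem_dedup]
    have := (hperm.map (fun k => ((PySem.List.count row k : Nat) : Int))).sum_eq
    rw [this]
    have hcd : (row.dedup.map (fun x => List.count x row)).sum = row.length :=
      List.sum_map_count_dedup_eq_length row
    calc (row.dedup.map (fun k => ((PySem.List.count row k : Nat) : Int))).sum
        = ((row.dedup.map (fun x => List.count x row)).sum : Int) := by
          rw [Nat.cast_list_sum, List.map_map]; rfl
      _ = (row.length : Int) := by rw [hcd]
  have hlv : vals.length = (PySem.Set.ofList row).length := by rw [hv, List.length_map]
  rw [hsum, hlv]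
  simp [PySem.List.len_eq]
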